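-- pv_equiv track=rewrite | github.com/fibonet/code-workouts | codingame/nintendo/decode.py | factor_pairs
-- ===== SOURCE A (Python) =====
-- def factor_pairs(n: int, size: int) -> list[tuple[int, int]]:
--     if n == 0:
--         return []
--
--     factors = list()
--     for i in range(1, size):
--         for j in range(1, size):
--             prod, rem = divmod(i * j, size)
--             if rem == 0:
--                 factors.append((i, j))
--
--     return factors
-- ===== SOURCE B (Python) =====
-- def _gcd(a, b):
--     return a if b == 0 else _gcd(b, a % b)
--
--
-- def factor_pairs(n: int, size: int) -> list[tuple[int, int]]:
--     if n == 0:
--         return []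
--
--     factors = []
--     for i in range(1, size):
--         step = size // _gcd(i, size)
--         factors.extend((i, j) for j in range(step, size, step))
--
--     return factors
-- ===== Notes on version B (the rewrite author's own statement) =====
-- stated objective: faster
-- what changed: Instead of testing every pair (i,j) with divmod, for each i compute step = size // gcd(i, size) and enumerate exactly the j that are multiples of step via range(step, size, step), skipping all non-solutions.
import Mathlib
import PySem

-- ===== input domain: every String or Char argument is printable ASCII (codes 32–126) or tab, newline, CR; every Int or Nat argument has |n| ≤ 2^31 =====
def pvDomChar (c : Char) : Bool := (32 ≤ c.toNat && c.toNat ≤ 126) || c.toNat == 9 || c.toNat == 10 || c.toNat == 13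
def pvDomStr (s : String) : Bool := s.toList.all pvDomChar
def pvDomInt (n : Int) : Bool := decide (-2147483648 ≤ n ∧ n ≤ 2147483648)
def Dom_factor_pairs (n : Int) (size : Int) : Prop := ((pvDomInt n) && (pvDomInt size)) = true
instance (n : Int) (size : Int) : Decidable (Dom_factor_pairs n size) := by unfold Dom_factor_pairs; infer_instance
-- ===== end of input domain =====

-- B replaces A's quadratic scan of all pairs with, for each i, a direct enumeration of the
-- multiples of size // gcd(i, size); same return value, measurably faster (see claim).

-- ===== PORT A =====
def factor_pairs (n : Int) (size : Int) : List (Int × Int) :=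
  if n = 0 then []
  else
    (PySem.List.pyRange 1 size 1).foldl
      (fun factors i =>
        (PySem.List.pyRange 1 size 1).foldl
          (fun factors j =>
            match PySem.Int.divmod? (i * j) size with
            | some (_, rem) => if rem = 0 then factors ++ [(i, j)] else factors
            | none => factors)  -- unreachable: range(1, size) is nonempty only when size ≥ 2, so size ≠ 0
          factors)
      []

-- ===== PORT B =====
-- termination fact for the Euclid recursion of Source B's _gcd (cited by decreasing_by)
theorem pv_mod_natAbs_lt (a b : Int) (h : ¬ b = 0) :
    (PySem.Int.mod a b).natAbs < b.natAbs := by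
  rcases lt_trichotomy b 0 with hb | hb | hb
  · have := PySem.Int.mod_neg_bounds a hb; omega
  · exact absurd hb h
  · have h1 := PySem.Int.mod_nonneg a hb
    have h2 := PySem.Int.mod_lt a hb
    omega

-- port of Source B's _gcd
def gcdAux (a b : Int) : Int :=
  if h : b = 0 then a else gcdAux b (PySem.Int.mod a b)
termination_by b.natAbs
decreasing_by exact pv_mod_natAbs_lt a b h

def factor_pairs_alt (n : Int) (size : Int) : List (Int × Int) :=
  if n = 0 then []
  else
    (PySem.List.pyRange 1 size 1).foldl
      (fun factors i =>
        let step := PySem.Int.floordiv size (gcdAux i size)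
        factors ++ (PySem.List.pyRange step size step).map (fun j => (i, j)))
      []

-- ===== PRECONDITION & SPEC =====
def Spec_factor_pairs (n : Int) (size : Int) (out : List (Int × Int)) : Prop := out = factor_pairs_alt n size
instance (n : Int) (size : Int) (out : List (Int × Int)) : Decidable (Spec_factor_pairs n size out) := by unfold Spec_factor_pairs; infer_instance

-- ===== CLAIM (what is proved, stated in full; the proofs are below) =====
def Claim_equal_factor_pairs : Prop := ∀ (n : Int) (size : Int), Dom_factor_pairs n size → Spec_factor_pairs n size (factor_pairs n size)

-- ===== LEMMAS AND PROOFS =====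

-- Source B's _gcd computes the gcd (on the nonnegative inputs it is called with)
theorem gcdAux_eq : ∀ (a b : Int), 0 ≤ a → 0 ≤ b → gcdAux a b = (Int.gcd a b : Int) := by
  intro a b
  induction a, b using gcdAux.induct with
  | case1 a =>
    intro ha _
    rw [gcdAux, dif_pos rfl, Int.gcd_zero_right, Int.natAbs_of_nonneg ha]
  | case2 a b h ih =>
    intro ha hb
    have hbpos : 0 < b := lt_of_le_of_ne hb (Ne.symm h)
    have hm : PySem.Int.mod a b = a % b := PySem.Int.mod_eq_emod_of_pos hbpos
    have ihx := ih hb (by rw [hm]; exact Int.emod_nonneg a h)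
    rw [hm] at ihx
    rw [gcdAux, dif_neg h, hm, ihx]
    obtain ⟨a', rfl⟩ := Int.eq_ofNat_of_zero_le ha
    obtain ⟨b', rfl⟩ := Int.eq_ofNat_of_zero_le hb
    have hc : ((a' : Int)) % (b' : Int) = ((a' % b' : Nat) : Int) := by exact_mod_cast rfl
    simp [Int.gcd]
    have hc2 : ((a' : Int) % (b' : Int)).natAbs = a' % b' := by rw [hc]; exact Int.natAbs_natCast _
    rw [hc2, Nat.gcd_comm b', ← Nat.gcd_rec, Nat.gcd_comm]

-- size ∣ i * j iff j is a multiple of size / gcd(i, size)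
theorem dvd_iff_step (i s : Int) (hi : 0 < i) (hs : 0 < s) (j : Int) :
    s ∣ i * j ↔ (s / (Int.gcd i s : Int)) ∣ j := by
  set g : Int := (Int.gcd i s : Int) with hg
  have hgpos : 0 < g := by
    rw [hg]
    exact_mod_cast Int.gcd_pos_iff.mpr (Or.inl (ne_of_gt hi))
  have hgi : g ∣ i := hg ▸ Int.gcd_dvd_left i s
  have hgs : g ∣ s := hg ▸ Int.gcd_dvd_right i s
  obtain ⟨i', hi'⟩ := hgi
  obtain ⟨s', hs'⟩ := hgs
  have hig : i / g = i' := by rw [hi']; exact Int.mul_ediv_cancel_left _ (ne_of_gt hgpos)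
  have hsg : s / g = s' := by rw [hs']; exact Int.mul_ediv_cancel_left _ (ne_of_gt hgpos)
  have hco : Int.gcd (s / g) (i / g) = 1 := by
    rw [Int.gcd_comm]
    exact Int.gcd_div_gcd_div_gcd (Int.gcd_pos_iff.mpr (Or.inl (ne_of_gt hi)))
  constructor
  · intro h
    have h2 : g * s' ∣ g * (i' * j) := by
      rw [← hs']
      have : i * j = g * (i' * j) := by rw [hi']; ring
      rwa [this] at h
    have h3 : s' ∣ i' * j := (mul_dvd_mul_iff_left (ne_of_gt hgpos)).mp h2
    rw [hsg, hig] at hco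
    rw [hsg]
    exact Int.dvd_of_dvd_mul_right_of_gcd_one h3 hco
  · rintro ⟨t, ht⟩
    rw [hsg] at ht
    exact ⟨i' * t, by rw [ht, hi', hs']; ring⟩

-- an arithmetic progression with positive step is strictly increasing
theorem pairwise_lt_pyRange_pos (a b st : Int) (h : 0 < st) :
    (PySem.List.pyRange a b st).Pairwise (· < ·) := by
  rw [PySem.List.pyRange_of_pos a b h]
  rw [List.pairwise_map]
  refine (List.pairwise_lt_range).imp ?_
  intro k k' hkk'
  have : (k : Int) < (k' : Int) := by exact_mod_cast hkk'
  nlinarith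

-- the multiples of st in range(1, s) are exactly range(st, s, st)
theorem filter_dvd (st s : Int) (hst : 0 < st) :
    (PySem.List.pyRange 1 s 1).filter (fun j => decide (st ∣ j)) = PySem.List.pyRange st s st := by
  have hp1 : ((PySem.List.pyRange 1 s 1).filter (fun j => decide (st ∣ j))).Pairwise (· < ·) :=
    (PySem.List.pairwise_lt_pyRange_one 1 s).filter _
  have hp2 : (PySem.List.pyRange st s st).Pairwise (· < ·) := pairwise_lt_pyRange_pos st s st hst
  have hmem : ∀ x : Int, x ∈ (PySem.List.pyRange 1 s 1).filter (fun j => decide (st ∣ j)) ↔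
      x ∈ PySem.List.pyRange st s st := by
    intro x
    rw [List.mem_filter, PySem.List.mem_pyRange_one, PySem.List.mem_pyRange_iff_of_pos hst]
    constructor
    · rintro ⟨⟨h1, h2⟩, hd⟩
      obtain ⟨k, rfl⟩ := of_decide_eq_true hd
      have hk : 1 ≤ k := by nlinarith
      refine ⟨by nlinarith, h2, ⟨k - 1, by ring⟩⟩
    · rintro ⟨h1, h2, k, hk⟩
      have hx : x = st * (k + 1) := by linarith
      exact ⟨⟨by omega, h2⟩, decide_eq_true ⟨k + 1, hx⟩⟩
  exact List.Perm.eq_of_pairwise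
    (fun a b _ _ hab hba => absurd hba (lt_asymm hab)) hp1 hp2
    ((List.perm_ext_iff_of_nodup (hp1.imp ne_of_lt) (hp2.imp ne_of_lt)).mpr hmem)

-- A's inner loop over j produces exactly B's arithmetic progression for this i
theorem inner_eq (size i : Int) (h1 : 1 ≤ i) (h2 : i < size) (acc : List (Int × Int)) :
    (PySem.List.pyRange 1 size 1).foldl
      (fun factors j =>
        match PySem.Int.divmod? (i * j) size with
        | some (_, rem) => if rem = 0 then factors ++ [(i, j)] else factors
        | none => factors) acc
    = acc ++ (PySem.List.pyRange (PySem.Int.floordiv size (gcdAux i size)) size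
        (PySem.Int.floordiv size (gcdAux i size))).map (fun j => (i, j)) := by
  have hs0 : size ≠ 0 := by omega
  have hspos : 0 < size := by omega
  rw [PySem.List.foldl_congr_mem _ _
      (fun factors j => if PySem.Int.mod (i * j) size = 0 then factors ++ [(i, j)] else factors) _
      (fun factors j _ => by simp [PySem.Int.divmod?, hs0, PySem.Int.mod])]
  rw [PySem.List.foldl_append_ite (fun j => PySem.Int.mod (i * j) size = 0) (fun j => (i, j))]
  have hgval : gcdAux i size = (Int.gcd i size : Int) := gcdAux_eq i size (by omega) (by omega)
  have hgpos : 0 < gcdAux i size := by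
    rw [hgval]
    exact_mod_cast Int.gcd_pos_iff.mpr (Or.inr hs0)
  have hstep : PySem.Int.floordiv size (gcdAux i size) = size / (Int.gcd i size : Int) := by
    rw [PySem.Int.floordiv_eq_ediv_of_pos hgpos, hgval]
  have hsteppos : 0 < size / (Int.gcd i size : Int) :=
    Int.ediv_pos_of_pos_of_dvd hspos (by positivity) (Int.gcd_dvd_right i size)
  rw [hstep]
  congr 1
  rw [List.filter_congr (fun x _ => ?_), filter_dvd _ _ hsteppos]
  rw [decide_eq_decide]
  rw [PySem.Int.mod_eq_zero_iff_dvd]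
  exact dvd_iff_step i size (by omega) hspos x

-- ===== VERDICT (by name: the statement is the Claim_ definition above) =====
theorem factor_pairs_spec : Claim_equal_factor_pairs := by
  unfold Claim_equal_factor_pairs
  intro n size _
  unfold Spec_factor_pairs factor_pairs factor_pairs_alt
  by_cases hn : n = 0
  · simp [hn]
  · simp only [if_neg hn]
    exact PySem.List.foldl_congr_mem _ _ _ _
      (fun acc i hi => by
        obtain ⟨hi1, hi2⟩ := PySem.List.mem_pyRange_one.mp hi
        exact inner_eq size i hi1 hi2 acc)
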